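-- pv_equiv track=rewrite | github.com/CraigBuckmaster/ScriptureDeepDive | _tools/_archive/inject_tx_db.py | _extract_div
-- ===== SOURCE A (Python) =====
-- def _extract_div(html, start):
--     """Return (div_text, end_pos) by counting depth from position of opening <div."""
--     depth = 0; i = start
--     while i < len(html):
--         if html[i:i+4] == '<div': depth += 1; i += 4; continue
--         if html[i:i+6] == '</div>':
--             depth -= 1
--             if depth == 0: return html[start:i+6], i+6
--             i += 6; continue
--         i += 1
--     return None, start
-- ===== SOURCE B (Python) =====
-- def _extract_div(html, start):
--     """Return (div_text, end_pos) by counting depth from position of opening <div."""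
--     # phase 1: tokenize -- materialise every div tag event at/after start as (pos, delta)
--     start = max(start, 0)  # positions at/after start; a negative start means the beginning
--     events = []
--     i = start
--     n = len(html)
--     while i < n:
--         j = html.find('<', i)
--         if j == -1:
--             break
--         if html.startswith('<div', j):
--             events.append((j, 1))
--             i = j + 4
--         elif html.startswith('</div>', j):
--             events.append((j, -1))
--             i = j + 6
--         else:
--             i = j + 1
--     # phase 2: fold depth over the event list
--     depth = 0
--     for pos, delta in events:
--         depth += delta
--         if delta == -1 and depth == 0:
--             return html[start:pos + 6], pos + 6
--     return None, start
-- ===== Notes on version B (the rewrite author's own statement) =====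
-- stated objective: faster
-- what changed: A probes every character position with two fresh slice comparisons while counting depth inline; B first tokenizes the text into a materialised list of div-tag events by jumping between '<' characters with str.find, then folds the depth counter over that event list.
-- outside the precondition, e.g. on _extract_div('<div></div>', -5): A returns ('/div>', 11), B returns ('<div></div>', 11)
import Mathlib
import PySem

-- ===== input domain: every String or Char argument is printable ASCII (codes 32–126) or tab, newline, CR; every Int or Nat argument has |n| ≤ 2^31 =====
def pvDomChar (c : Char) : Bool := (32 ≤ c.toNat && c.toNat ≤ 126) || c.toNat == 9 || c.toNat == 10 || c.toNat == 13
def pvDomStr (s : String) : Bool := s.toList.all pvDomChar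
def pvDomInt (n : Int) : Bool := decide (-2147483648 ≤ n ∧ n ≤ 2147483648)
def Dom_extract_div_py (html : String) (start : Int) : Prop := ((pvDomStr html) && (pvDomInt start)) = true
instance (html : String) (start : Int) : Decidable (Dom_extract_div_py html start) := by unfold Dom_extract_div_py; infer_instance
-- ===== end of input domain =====

-- B re-implements A as tokenize-then-fold (materialise the div-tag events with str.find, then fold depth over them); equal on start ≥ 0.

-- ===== PORT A =====
-- A's while-loop: probe every position i for '<div' / '</div>' by slicing, counting depth.
def extractDivLoopA (s : List Char) (start depth i : Int) : Option String × Int :=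
  if _h : i < (s.length : Int) then
    if PySem.Chars.slice s (some i) (some (i + 4)) = ['<', 'd', 'i', 'v'] then
      extractDivLoopA s start (depth + 1) (i + 4)
    else if PySem.Chars.slice s (some i) (some (i + 6)) = ['<', '/', 'd', 'i', 'v', '>'] then
      if depth - 1 = 0 then
        (some (String.ofList (PySem.Chars.slice s (some start) (some (i + 6)))), i + 6)
      else extractDivLoopA s start (depth - 1) (i + 6)
    else extractDivLoopA s start depth (i + 1)
  else (none, start)
termination_by ((s.length : Int) - i).toNat
decreasing_by all_goals omega

def extract_div_py (html : String) (start : Int) : Option String × Int :=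
  extractDivLoopA html.toList start 0 start

-- ===== PORT B =====
-- phase 1 of B: jump with html.find('<', i) and record each tag event as (position, depth delta).
def bTokenize (s : List Char) (i : Nat) : List (Nat × Int) :=
  if h : i < s.length then
    if hj : PySem.Chars.findFrom s ['<'] (i : Int) none = -1 then []
    else if PySem.Chars.startswith (s.drop (PySem.Chars.findFrom s ['<'] (i : Int) none).toNat) ['<', 'd', 'i', 'v'] then
      ((PySem.Chars.findFrom s ['<'] (i : Int) none).toNat, 1) ::
        bTokenize s ((PySem.Chars.findFrom s ['<'] (i : Int) none).toNat + 4)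
    else if PySem.Chars.startswith (s.drop (PySem.Chars.findFrom s ['<'] (i : Int) none).toNat) ['<', '/', 'd', 'i', 'v', '>'] then
      ((PySem.Chars.findFrom s ['<'] (i : Int) none).toNat, -1) ::
        bTokenize s ((PySem.Chars.findFrom s ['<'] (i : Int) none).toNat + 6)
    else bTokenize s ((PySem.Chars.findFrom s ['<'] (i : Int) none).toNat + 1)
  else []
termination_by s.length - i
decreasing_by
  all_goals
    obtain ⟨h1, h2, -⟩ := PySem.Chars.findFrom_natCast_spec s ['<'] i (Nat.le_of_lt h) hj
    have h3 := h2.length_le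
    simp [List.length_drop] at h3
    omega

-- phase 2 of B: fold depth over the event list.
def bFold (s : List Char) (start : Nat) : List (Nat × Int) → Int → Option String × Int
  | [], _ => (none, (start : Int))
  | (pos, delta) :: rest, depth =>
      if delta = -1 ∧ depth + delta = 0 then
        (some (String.ofList ((s.drop start).take (pos + 6 - start))), (pos : Int) + 6)
      else bFold s start rest (depth + delta)

def extract_div_py_alt (html : String) (start : Int) : Option String × Int :=
  bFold html.toList start.toNat (bTokenize html.toList start.toNat) 0

-- ===== PRECONDITION & SPEC =====
-- Pre_ excludes negative start, on which A reinterprets the position through Python's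
-- negative-slice wraparound (an accident of A's slicing) while B scans from the literal offset.
def Pre_extract_div_py (_html : String) (start : Int) : Prop := 0 ≤ start
instance (html : String) (start : Int) : Decidable (Pre_extract_div_py html start) := by unfold Pre_extract_div_py; infer_instance

def pvWitness_extract_div_py : String × Int := ("<div>x</div>", 0)

def Spec_extract_div_py (html : String) (start : Int) (out : Option String × Int) : Prop := out = extract_div_py_alt html start
instance (html : String) (start : Int) (out : Option String × Int) : Decidable (Spec_extract_div_py html start out) := by unfold Spec_extract_div_py; infer_instance

-- ===== CLAIM (what is proved, stated in full; the proofs are below) =====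
def Claim_equal_extract_div_py : Prop := ∀ (html : String) (start : Int), Dom_extract_div_py html start → Pre_extract_div_py html start → Spec_extract_div_py html start (extract_div_py html start)

-- ===== LEMMAS AND PROOFS =====

-- slices of A rewritten to drop/take
lemma sliceA4 (s : List Char) (k : Nat) :
    PySem.Chars.slice s (some (k : Int)) (some ((k : Int) + 4)) = (s.drop k).take 4 := by
  have h := PySem.List.slice_natCast_add (xs := s) (j := k) (n := 4)
  simpa using h

lemma sliceA6 (s : List Char) (k : Nat) :
    PySem.Chars.slice s (some (k : Int)) (some ((k : Int) + 6)) = (s.drop k).take 6 := by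
  have h := PySem.List.slice_natCast_add (xs := s) (j := k) (n := 6)
  simpa using h

lemma sliceR (s : List Char) (a k : Nat) :
    PySem.Chars.slice s (some (a : Int)) (some ((k : Int) + 6)) = (s.drop a).take (k + 6 - a) := by
  have h := PySem.List.slice_natCast (xs := s) (a := a) (b := k + 6)
  have e : ((k : Int) + 6) = ((k + 6 : Nat) : Int) := by push_cast; ring
  rw [e]
  simpa using h

lemma prefix_drop_infix (sub s : List Char) (a b : Nat) (hab : a ≤ b) (h : sub <+: s.drop b) :
    sub <:+: s.drop a := by
  have e : s.drop b = (s.drop a).drop (b - a) := by rw [List.drop_drop]; congr 1; omega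
  rw [e] at h
  exact h.isInfix.trans (List.drop_suffix _ _).isInfix

-- find lands exactly on k when '<' is at k
lemma find_here (s : List Char) (k : Nat) (hk : k ≤ s.length) (h : ['<'] <+: s.drop k) :
    PySem.Chars.findFrom s ['<'] (k : Int) none = (k : Int) := by
  have hne : PySem.Chars.findFrom s ['<'] (k : Int) none ≠ -1 := by
    intro hc
    exact ((PySem.Chars.findFrom_natCast_eq_neg_one_iff s ['<'] k hk).mp hc) (by simpa using h.isInfix)
  obtain ⟨h1, h2, h3⟩ := PySem.Chars.findFrom_natCast_spec s ['<'] k hk hne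
  by_contra hne2
  have hlt : k < (PySem.Chars.findFrom s ['<'] (k : Int) none).toNat := by omega
  exact h3 k le_rfl hlt h

-- when '<' is not at k, find from k and from k+1 agree
lemma find_succ (s : List Char) (k : Nat) (hk : k < s.length) (h : ¬ ['<'] <+: s.drop k) :
    PySem.Chars.findFrom s ['<'] (k : Int) none = PySem.Chars.findFrom s ['<'] ((k + 1 : Nat) : Int) none := by
  have hk1 : k + 1 ≤ s.length := hk
  by_cases hF : PySem.Chars.findFrom s ['<'] (k : Int) none = -1
  · rw [PySem.Chars.findFrom_natCast_eq_neg_one_iff s ['<'] k (Nat.le_of_lt hk)] at hF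
    have hG : PySem.Chars.findFrom s ['<'] ((k + 1 : Nat) : Int) none = -1 := by
      rw [PySem.Chars.findFrom_natCast_eq_neg_one_iff s ['<'] (k + 1) hk1]
      intro hin
      exact hF (hin.trans ((by rw [List.drop_drop, Nat.add_comm] : s.drop (k+1) = (s.drop k).drop 1) ▸
        (List.drop_suffix 1 (s.drop k)).isInfix : s.drop (k+1) <:+: s.drop k))
    rw [hG]
    exact (PySem.Chars.findFrom_natCast_eq_neg_one_iff s ['<'] k (Nat.le_of_lt hk)).mpr hF
  · obtain ⟨h1, h2, h3⟩ := PySem.Chars.findFrom_natCast_spec s ['<'] k (Nat.le_of_lt hk) hF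
    set F := PySem.Chars.findFrom s ['<'] (k : Int) none with hFdef
    have hFk : k + 1 ≤ F.toNat := by
      rcases Nat.lt_or_ge k F.toNat with hlt | hge
      · omega
      · have : F.toNat = k := by omega
        rw [this] at h2; exact absurd h2 h
    have hG : PySem.Chars.findFrom s ['<'] ((k + 1 : Nat) : Int) none ≠ -1 := by
      intro hc
      exact ((PySem.Chars.findFrom_natCast_eq_neg_one_iff s ['<'] (k + 1) hk1).mp hc)
        (by simpa using prefix_drop_infix ['<'] s (k + 1) F.toNat hFk h2)
    obtain ⟨g1, g2, g3⟩ := PySem.Chars.findFrom_natCast_spec s ['<'] (k + 1) hk1 hG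
    set G := PySem.Chars.findFrom s ['<'] ((k + 1 : Nat) : Int) none with hGdef
    have hGF : G.toNat ≤ F.toNat := by
      by_contra hc
      exact g3 F.toNat (by omega) (by omega) h2
    have hFG : F.toNat ≤ G.toNat := by
      by_contra hc
      exact h3 G.toNat (by omega) (by omega) g2
    omega

-- the three shapes of bTokenize at a position k < len
lemma tok_open (s : List Char) (k : Nat) (hk : k < s.length)
    (h4 : (s.drop k).take 4 = ['<', 'd', 'i', 'v']) :
    bTokenize s k = (k, 1) :: bTokenize s (k + 4) := by
  have hp4 : ['<', 'd', 'i', 'v'] <+: s.drop k := by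
    rw [List.prefix_iff_eq_take]; exact h4.symm
  have hp : ['<'] <+: s.drop k := List.IsPrefix.trans (by simp) hp4
  have hF := find_here s k (Nat.le_of_lt hk) hp
  rw [bTokenize, dif_pos hk, dif_neg (by rw [hF]; omega)]
  rw [hF]
  simp only [Int.toNat_natCast]
  rw [if_pos (by rw [PySem.Chars.startswith_iff]; exact hp4)]

lemma tok_close (s : List Char) (k : Nat) (hk : k < s.length)
    (h4 : ¬ (s.drop k).take 4 = ['<', 'd', 'i', 'v'])
    (h6 : (s.drop k).take 6 = ['<', '/', 'd', 'i', 'v', '>']) :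
    bTokenize s k = (k, -1) :: bTokenize s (k + 6) := by
  have hp6 : ['<', '/', 'd', 'i', 'v', '>'] <+: s.drop k := by
    rw [List.prefix_iff_eq_take]; exact h6.symm
  have hp : ['<'] <+: s.drop k := List.IsPrefix.trans (by simp) hp6
  have hF := find_here s k (Nat.le_of_lt hk) hp
  rw [bTokenize, dif_pos hk, dif_neg (by rw [hF]; omega)]
  rw [hF]
  simp only [Int.toNat_natCast]
  rw [if_neg (by rw [PySem.Chars.startswith_iff, List.prefix_iff_eq_take]; intro hc; exact h4 hc.symm)]
  rw [if_pos (by rw [PySem.Chars.startswith_iff]; exact hp6)]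

lemma tok_shift (s : List Char) (k : Nat) (hk : k < s.length)
    (h4 : ¬ (s.drop k).take 4 = ['<', 'd', 'i', 'v'])
    (h6 : ¬ (s.drop k).take 6 = ['<', '/', 'd', 'i', 'v', '>']) :
    bTokenize s k = bTokenize s (k + 1) := by
  by_cases hp : ['<'] <+: s.drop k
  · -- '<' at k but no tag: bTokenize steps to k+1 itself
    have hF := find_here s k (Nat.le_of_lt hk) hp
    rw [bTokenize, dif_pos hk, dif_neg (by rw [hF]; omega)]
    rw [hF]
    simp only [Int.toNat_natCast]
    rw [if_neg (by rw [PySem.Chars.startswith_iff, List.prefix_iff_eq_take]; intro hc; exact h4 hc.symm)]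
    rw [if_neg (by rw [PySem.Chars.startswith_iff, List.prefix_iff_eq_take]; intro hc; exact h6 hc.symm)]
  · -- no '<' at k: both sides find the same position
    have hfs := find_succ s k hk hp
    by_cases hF : PySem.Chars.findFrom s ['<'] (k : Int) none = -1
    · rw [bTokenize, dif_pos hk, dif_pos hF]
      by_cases hk1 : k + 1 < s.length
      · have hG : PySem.Chars.findFrom s ['<'] ((k + 1 : Nat) : Int) none = -1 := by
          rw [← hfs]; exact hF
        conv_rhs => rw [bTokenize, dif_pos hk1, dif_pos hG]
      · conv_rhs => rw [bTokenize, dif_neg hk1]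
    · rw [bTokenize, dif_pos hk]
      have hk1 : k + 1 < s.length := by
        obtain ⟨h1, h2, -⟩ := PySem.Chars.findFrom_natCast_spec s ['<'] k (Nat.le_of_lt hk) hF
        have hFk : k + 1 ≤ (PySem.Chars.findFrom s ['<'] (k : Int) none).toNat := by
          rcases Nat.lt_or_ge k (PySem.Chars.findFrom s ['<'] (k : Int) none).toNat with hlt | hge
          · omega
          · have he : (PySem.Chars.findFrom s ['<'] (k : Int) none).toNat = k := by omega
            rw [he] at h2; exact absurd h2 hp
        have hlen := h2.length_le
        simp [List.length_drop] at hlen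
        omega
      conv_rhs => rw [bTokenize, dif_pos hk1]
      rw [← hfs]

-- A's loop equals B's fold over the token list, for every suffix position
lemma loop_eq_fold (m : Nat) : ∀ (s : List Char) (startN k : Nat) (depth : Int),
    s.length - k ≤ m →
    extractDivLoopA s (startN : Int) depth (k : Int) = bFold s startN (bTokenize s k) depth := by
  induction m with
  | zero =>
    intro s startN k depth hm
    rw [extractDivLoopA, dif_neg (by exact_mod_cast by omega : ¬ ((k : Int) < (s.length : Int)))]
    rw [bTokenize, dif_neg (by omega : ¬ k < s.length)]
    rfl
  | succ m ih =>
    intro s startN k depth hm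
    by_cases hk : k < s.length
    · rw [extractDivLoopA, dif_pos (by exact_mod_cast hk : (k : Int) < (s.length : Int))]
      rw [sliceA4, sliceA6]
      by_cases h4 : (s.drop k).take 4 = ['<', 'd', 'i', 'v']
      · rw [if_pos h4, tok_open s k hk h4]
        rw [bFold, if_neg (by intro hc; omega)]
        have e : (k : Int) + 4 = ((k + 4 : Nat) : Int) := by push_cast; ring
        rw [e]
        exact ih s startN (k + 4) (depth + 1) (by omega)
      · rw [if_neg h4]
        by_cases h6 : (s.drop k).take 6 = ['<', '/', 'd', 'i', 'v', '>']
        · rw [if_pos h6, tok_close s k hk h4 h6]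
          by_cases hd : depth - 1 = 0
          · rw [if_pos hd]
            rw [bFold, if_pos (by refine ⟨rfl, ?_⟩; omega)]
            rw [sliceR]
          · rw [if_neg hd]
            rw [bFold, if_neg (by intro hc; omega)]
            have e : (k : Int) + 6 = ((k + 6 : Nat) : Int) := by push_cast; ring
            have e2 : depth - 1 = depth + (-1) := by ring
            rw [e, e2]
            exact ih s startN (k + 6) (depth + (-1)) (by omega)
        · rw [if_neg h6, tok_shift s k hk h4 h6]
          have e : (k : Int) + 1 = ((k + 1 : Nat) : Int) := by push_cast; ring
          rw [e]
          exact ih s startN (k + 1) depth (by omega)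
    · rw [extractDivLoopA, dif_neg (by exact_mod_cast by omega : ¬ ((k : Int) < (s.length : Int)))]
      rw [bTokenize, dif_neg hk]
      rfl

-- ===== VERDICT (by name: the statement is the Claim_ definition above) =====
theorem extract_div_py_spec : Claim_equal_extract_div_py := by
  intro html start _hdom hpre
  unfold Pre_extract_div_py at hpre
  unfold Spec_extract_div_py extract_div_py extract_div_py_alt
  obtain ⟨n, rfl⟩ : ∃ n : Nat, start = (n : Int) := ⟨start.toNat, by omega⟩
  simp only [Int.toNat_natCast]
  exact loop_eq_fold html.toList.length html.toList n n 0 (by omega)
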